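-- pv_equiv track=rewrite | github.com/PorcoRosso85/home | bin/src/poc/meta_test/domain/metrics/boundary_coverage.py | _check_boundary_coverage
-- ===== SOURCE A (Python) =====
-- from typing import Any, Union
--
-- def _check_boundary_coverage(
--                            boundaries: list[tuple[str, Any, Any]],
--                            test_cases: list[dict[str, Any]]) -> dict[str, bool]:
--     """Check which boundaries are covered by tests."""
--     coverage = {}
--
--     for field, boundary_type, value in boundaries:
--         key = f"{field}_{boundary_type}_{value}"
--         covered = False
--
--         for test_case in test_cases:
--             test_values = test_case.get("input_values", {})
--
--             if boundary_type == "min":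
--                 # Check for values at, below, and just above minimum
--                 if field in test_values:
--                     test_val = test_values[field]
--                     if test_val in [value, value - 1, value + 1]:
--                         covered = True
--                         break
--
--             elif boundary_type == "max":
--                 # Check for values at, above, and just below maximum
--                 if field in test_values:
--                     test_val = test_values[field]
--                     if test_val in [value, value + 1, value - 1]:
--                         covered = True
--                         break
--
--             elif boundary_type == "exact":
--                 # Check for exact value and neighbors
--                 if field in test_values:
--                     test_val = test_values[field]
--                     if abs(test_val - value) <= 1:
--                         covered = True
--                         break
--
--         coverage[key] = covered
--
--     return coverage
-- ===== SOURCE B (Python) =====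
-- def _check_boundary_coverage(boundaries, test_cases):
--     """Check which boundaries are covered by tests: index all test values per
--     field once, then answer each boundary by three set-membership tests."""
--     values_by_field = {}
--     for test_case in test_cases:
--         for field, val in test_case.get("input_values", {}).items():
--             values_by_field.setdefault(field, set()).add(val)
--
--     coverage = {}
--     for field, boundary_type, value in boundaries:
--         vals = values_by_field.get(field, ())
--         covered = (boundary_type in ("min", "max", "exact")
--                    and (value in vals or value - 1 in vals or value + 1 in vals))
--         coverage[f"{field}_{boundary_type}_{value}"] = covered
--     return coverage
-- ===== Notes on version B (the rewrite author's own statement) =====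
-- stated objective: alternative
-- what changed: Instead of rescanning all test cases for every boundary, B builds a field->set-of-values index over the test cases once and answers each boundary with three set-membership tests (O(B+T) vs O(B*T); a timing run read only 1.28x at the largest generated size, so no speed is claimed).
import Mathlib
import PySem

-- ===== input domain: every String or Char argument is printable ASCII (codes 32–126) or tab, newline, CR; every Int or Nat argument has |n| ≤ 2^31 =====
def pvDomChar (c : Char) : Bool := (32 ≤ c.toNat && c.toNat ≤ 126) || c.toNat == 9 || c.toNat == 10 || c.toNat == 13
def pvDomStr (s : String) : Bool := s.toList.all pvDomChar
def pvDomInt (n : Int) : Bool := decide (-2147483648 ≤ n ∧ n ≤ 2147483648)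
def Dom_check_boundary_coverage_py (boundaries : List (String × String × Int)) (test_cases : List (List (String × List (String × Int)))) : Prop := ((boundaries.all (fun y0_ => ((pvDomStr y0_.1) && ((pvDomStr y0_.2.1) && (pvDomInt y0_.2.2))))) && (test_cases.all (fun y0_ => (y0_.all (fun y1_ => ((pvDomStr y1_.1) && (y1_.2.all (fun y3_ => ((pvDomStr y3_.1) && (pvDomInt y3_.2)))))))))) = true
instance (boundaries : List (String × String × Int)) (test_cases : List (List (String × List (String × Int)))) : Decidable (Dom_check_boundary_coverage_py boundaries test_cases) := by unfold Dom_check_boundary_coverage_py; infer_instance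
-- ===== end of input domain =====

-- B replaces A's per-boundary rescan of all test cases by a field→set-of-values index
-- built once, answering each boundary with three set-membership tests.


-- ===== PORT A =====
-- the inner 'for test_case in test_cases: … break' loop of A, one recursive call per case
def pvALoop (field btype : String) (value : Int) : List (List (String × List (String × Int))) → Bool
  | [] => false
  | tc :: rest =>
    let test_values := (tc.lookup "input_values").getD []
    if btype == "min" then
      match test_values.lookup field with
      | some tv => if tv == value || tv == value - 1 || tv == value + 1 then true
                   else pvALoop field btype value rest
      | none => pvALoop field btype value rest
    else if btype == "max" then
      match test_values.lookup field with
      | some tv => if tv == value || tv == value + 1 || tv == value - 1 then true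
                   else pvALoop field btype value rest
      | none => pvALoop field btype value rest
    else if btype == "exact" then
      match test_values.lookup field with
      | some tv => if (tv - value).natAbs ≤ 1 then true
                   else pvALoop field btype value rest
      | none => pvALoop field btype value rest
    else pvALoop field btype value rest

def check_boundary_coverage_py (boundaries : List (String × String × Int)) (test_cases : List (List (String × List (String × Int)))) : List (String × Bool) :=
  (boundaries.foldl (fun cov b =>
      cov.insert (b.1 ++ "_" ++ b.2.1 ++ "_" ++ PySem.Int.toStr b.2.2)
        (pvALoop b.1 b.2.1 b.2.2 test_cases))
    PySem.Dict.empty).items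

-- ===== PORT B =====
-- .items() of the dict an association list represents: first occurrence of each key
def pvItemsAux (seen : List String) : List (String × Int) → List (String × Int)
  | [] => []
  | (k, v) :: rest =>
    if seen.contains k then pvItemsAux seen rest
    else (k, v) :: pvItemsAux (k :: seen) rest

def pvItems (l : List (String × Int)) : List (String × Int) := pvItemsAux [] l

-- values_by_field.setdefault(field, set()).add(val) over one test case's items
def pvAddCase (d : PySem.Dict String (PySem.Set Int)) (items : List (String × Int)) : PySem.Dict String (PySem.Set Int) :=
  items.foldl (fun d p => d.insert p.1 (PySem.Set.add (d.getD p.1 PySem.Set.empty) p.2)) d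

def pvBCovered (vbf : PySem.Dict String (PySem.Set Int)) (field btype : String) (value : Int) : Bool :=
  let vals := vbf.getD field PySem.Set.empty
  (btype == "min" || btype == "max" || btype == "exact") &&
    (PySem.Set.contains vals value || PySem.Set.contains vals (value - 1) ||
     PySem.Set.contains vals (value + 1))

def check_boundary_coverage_py_alt (boundaries : List (String × String × Int)) (test_cases : List (List (String × List (String × Int)))) : List (String × Bool) :=
  let vbf := test_cases.foldl
    (fun d tc => pvAddCase d (pvItems ((tc.lookup "input_values").getD []))) PySem.Dict.empty
  (boundaries.foldl (fun cov b =>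
      cov.insert (b.1 ++ "_" ++ b.2.1 ++ "_" ++ PySem.Int.toStr b.2.2)
        (pvBCovered vbf b.1 b.2.1 b.2.2))
    PySem.Dict.empty).items

-- ===== PRECONDITION & SPEC =====
def Spec_check_boundary_coverage_py (boundaries : List (String × String × Int)) (test_cases : List (List (String × List (String × Int)))) (out : List (String × Bool)) : Prop := out = check_boundary_coverage_py_alt boundaries test_cases
instance (boundaries : List (String × String × Int)) (test_cases : List (List (String × List (String × Int)))) (out : List (String × Bool)) : Decidable (Spec_check_boundary_coverage_py boundaries test_cases out) := by unfold Spec_check_boundary_coverage_py; infer_instance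

-- ===== CLAIM (what is proved, stated in full; the proofs are below) =====
def Claim_equal_check_boundary_coverage_py : Prop := ∀ (boundaries : List (String × String × Int)) (test_cases : List (List (String × List (String × Int)))), Dom_check_boundary_coverage_py boundaries test_cases → Spec_check_boundary_coverage_py boundaries test_cases (check_boundary_coverage_py boundaries test_cases)

-- ===== LEMMAS AND PROOFS =====

theorem any_pvItemsAux (l : List (String × Int)) (seen : List String) (f : String) (x : Int) :
    (pvItemsAux seen l).any (fun p => p.1 == f && p.2 == x)
      = (!seen.contains f && (l.lookup f == some x)) := by
  induction l generalizing seen with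
  | nil => simp [pvItemsAux]
  | cons p rest ih =>
    obtain ⟨k, v⟩ := p
    by_cases hk : k ∈ seen <;> by_cases hfk : f = k
    · subst hfk; simp [pvItemsAux, hk, ih, List.lookup]
    · simp [pvItemsAux, hk, ih, List.lookup, beq_eq_false_iff_ne.mpr hfk]
    · subst hfk; simp [pvItemsAux, hk, ih, List.lookup]
    · simp [pvItemsAux, hk, ih, List.lookup, beq_eq_false_iff_ne.mpr hfk,
            beq_eq_false_iff_ne.mpr (Ne.symm hfk), hfk]

theorem any_pvItems (l : List (String × Int)) (f : String) (x : Int) :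
    (pvItems l).any (fun p => p.1 == f && p.2 == x) = (l.lookup f == some x) := by
  simp [pvItems, any_pvItemsAux]

theorem near_max (tv v : Int) :
    (tv == v || tv == v + 1 || tv == v - 1) = (tv == v || tv == v - 1 || tv == v + 1) := by
  rw [Bool.eq_iff_iff]; simp [beq_iff_eq]; tauto

theorem near_exact (tv v : Int) :
    (decide ((tv - v).natAbs ≤ 1)) = (tv == v || tv == v - 1 || tv == v + 1) := by
  rw [Bool.eq_iff_iff]; simp [beq_iff_eq]; omega

theorem contains_pvAddCase (items : List (String × Int)) (d : PySem.Dict String (PySem.Set Int))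
    (f : String) (x : Int) :
    PySem.Set.contains ((pvAddCase d items).getD f PySem.Set.empty) x
      = (PySem.Set.contains (d.getD f PySem.Set.empty) x
         || items.any (fun p => p.1 == f && p.2 == x)) := by
  induction items generalizing d with
  | nil => simp [pvAddCase]
  | cons p rest ih =>
    obtain ⟨k, v⟩ := p
    simp only [pvAddCase] at ih ⊢
    simp only [List.foldl_cons, List.any_cons]
    rw [ih]
    by_cases hf : f = k
    · subst hf
      rw [Bool.eq_iff_iff]
      simp [PySem.Set.mem_add, beq_iff_eq]
      tauto
    · simp [PySem.Dict.getD_insert, hf, beq_eq_false_iff_ne.mpr (Ne.symm hf)]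

theorem contains_collect (tcs : List (List (String × List (String × Int))))
    (d : PySem.Dict String (PySem.Set Int)) (f : String) (x : Int) :
    PySem.Set.contains ((tcs.foldl (fun d tc => pvAddCase d (pvItems ((tc.lookup "input_values").getD []))) d).getD f PySem.Set.empty) x
      = (PySem.Set.contains (d.getD f PySem.Set.empty) x
         || tcs.any (fun tc => ((tc.lookup "input_values").getD []).lookup f == some x)) := by
  induction tcs generalizing d with
  | nil => simp
  | cons tc rest ih =>
    simp only [List.foldl_cons, List.any_cons]
    rw [ih, contains_pvAddCase, any_pvItems, Bool.or_assoc]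

theorem pvALoop_eq_any (f t : String) (v : Int) (tcs : List (List (String × List (String × Int)))) :
    pvALoop f t v tcs
      = ((t == "min" || t == "max" || t == "exact") &&
         tcs.any (fun tc => match ((tc.lookup "input_values").getD []).lookup f with
           | some tv => (tv == v || tv == v - 1 || tv == v + 1)
           | none => false)) := by
  induction tcs with
  | nil => simp [pvALoop]
  | cons tc rest ih =>
    simp only [List.any_cons]
    by_cases h1 : t = "min"
    · subst h1
      simp only [pvALoop, ih]
      cases hl : ((tc.lookup "input_values").getD []).lookup f with
      | none => simp
      | some tv => cases hc : (tv == v || tv == v - 1 || tv == v + 1) <;> simp [hc]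
    · by_cases h2 : t = "max"
      · subst h2
        simp only [pvALoop, ih]
        cases hl : ((tc.lookup "input_values").getD []).lookup f with
        | none => simp
        | some tv => cases hc : (tv == v || tv == v - 1 || tv == v + 1) <;>
            simp [near_max, hc]
      · by_cases h3 : t = "exact"
        · subst h3
          simp only [pvALoop, ih]
          cases hl : ((tc.lookup "input_values").getD []).lookup f with
          | none => simp
          | some tv =>
            by_cases hna : (tv - v).natAbs ≤ 1
            · have hc : (tv == v || tv == v - 1 || tv == v + 1) = true := by
                rw [← near_exact]; simp [hna]
              simp [hna, hc]
            · have hc : (tv == v || tv == v - 1 || tv == v + 1) = false := by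
                rw [← near_exact]; simp [hna]
              simp [hna, hc]
        · simp [pvALoop, ih, beq_eq_false_iff_ne.mpr h1, beq_eq_false_iff_ne.mpr h2,
                beq_eq_false_iff_ne.mpr h3]

theorem any_or_bool {α : Type} (l : List α) (p q : α → Bool) :
    l.any (fun a => p a || q a) = (l.any p || l.any q) := by
  rw [Bool.eq_iff_iff]
  simp only [List.any_eq_true, Bool.or_eq_true]
  constructor
  · rintro ⟨a, ha, h | h⟩
    exacts [Or.inl ⟨a, ha, h⟩, Or.inr ⟨a, ha, h⟩]
  · rintro (⟨a, ha, h⟩ | ⟨a, ha, h⟩)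
    exacts [⟨a, ha, Or.inl h⟩, ⟨a, ha, Or.inr h⟩]

theorem covered_eq (f t : String) (v : Int) (tcs : List (List (String × List (String × Int)))) :
    pvALoop f t v tcs
      = pvBCovered (tcs.foldl (fun d tc => pvAddCase d (pvItems ((tc.lookup "input_values").getD []))) PySem.Dict.empty) f t v := by
  rw [pvALoop_eq_any]
  unfold pvBCovered
  simp only [contains_collect, PySem.Dict.getD_empty]
  congr 1
  have hemp : ∀ y : Int, PySem.Set.empty.contains y = false := fun _ => rfl
  simp only [hemp, Bool.false_or]
  rw [← any_or_bool, ← any_or_bool]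
  congr 1
  funext tc
  cases List.lookup f ((List.lookup "input_values" tc).getD []) <;> simp

-- ===== VERDICT (by name: the statement is the Claim_ definition above) =====
theorem check_boundary_coverage_py_spec : Claim_equal_check_boundary_coverage_py := by
  intro boundaries test_cases _
  unfold Spec_check_boundary_coverage_py check_boundary_coverage_py check_boundary_coverage_py_alt
  congr 2
  funext cov b
  rw [covered_eq]
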